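-- pv_equiv track=rewrite | github.com/Xilinx/mlir-aie | reference_designs/log_hello_world/elfStringParser.py | _gen_string_dict
-- ===== SOURCE A (Python) =====
-- from typing import Dict
--
-- def _gen_string_dict(stringsoutput:str, rooffset:int=0)->Dict[int,str]:
--     lines = stringsoutput.split("\n")
--     result = {}
--     first = True
--     first_val = 0
--     for line in lines:
--         l = line.lstrip()
--         try:
--             hex_num, text = l.split(' ',1)
--             if first:
--                 first_val = int(hex_num, 16)
--                 result[rooffset] = text
--                 first=False
--             else:
--                 result[(int(hex_num,16) - first_val) + rooffset] = text
--         except: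
--             pass
--     return result
-- ===== SOURCE B (Python) =====
-- def _gen_string_dict(stringsoutput: str, rooffset: int = 0):
--     pairs = []
--     for line in stringsoutput.split("\n"):
--         try:
--             hex_num, text = line.lstrip().split(' ', 1)
--             pairs.append((int(hex_num, 16), text))
--         except:
--             pass
--     if not pairs:
--         return {}
--     base = pairs[0][0]
--     return {(v - base) + rooffset: t for v, t in pairs}
-- ===== Notes on version B (the rewrite author's own statement) =====
-- stated objective: simpler
-- what changed: Two-phase decomposition: first collect all (value, text) pairs, then build the dict with one uniform formula keyed off the first pair's value, eliminating the stateful first/first_val flag from the loop.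
import Mathlib
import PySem

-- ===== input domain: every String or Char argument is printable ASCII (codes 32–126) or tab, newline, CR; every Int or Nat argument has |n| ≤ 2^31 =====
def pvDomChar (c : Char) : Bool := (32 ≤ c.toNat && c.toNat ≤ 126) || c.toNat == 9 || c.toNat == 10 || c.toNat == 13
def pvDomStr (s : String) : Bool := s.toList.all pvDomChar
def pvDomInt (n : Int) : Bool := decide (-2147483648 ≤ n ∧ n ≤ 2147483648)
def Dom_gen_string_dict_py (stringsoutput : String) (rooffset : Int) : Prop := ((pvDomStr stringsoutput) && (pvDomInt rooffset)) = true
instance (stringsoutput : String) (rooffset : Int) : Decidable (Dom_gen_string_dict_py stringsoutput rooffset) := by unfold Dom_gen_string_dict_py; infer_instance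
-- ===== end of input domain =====

-- B builds the dict in two phases (collect (value, text) pairs, then one uniform keying formula
-- using the first pair's value), removing A's stateful first/first_val flag: objective 'simpler'.


-- ===== PORT A =====
-- One loop iteration of A: state is (result, first, first_val); the try/except skips
-- a line when split(' ',1) yields no second piece or int(hex_num,16) raises.
def pvStepA (rooffset : Int) (st : PySem.Dict Int String × Bool × Int) (line : String) :
    PySem.Dict Int String × Bool × Int :=
  let l := PySem.Str.lstrip line
  match PySem.Str.splitMax? l " " 1 with
  | some [hex_num, text] =>
    match PySem.Int.ofStrBase? hex_num 16 with
    | some v =>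
      if st.2.1 then (st.1.insert rooffset text, false, v)
      else (st.1.insert ((v - st.2.2) + rooffset) text, st.2.1, st.2.2)
    | none => st
  | _ => st

def gen_string_dict_py (stringsoutput : String) (rooffset : Int) : List (Int × String) :=
  let lines := (PySem.Str.split? stringsoutput "\n").getD []
  (lines.foldl (pvStepA rooffset) (PySem.Dict.empty, true, 0)).1.items

-- ===== PORT B =====
-- B's per-line parse: some (int(hex,16), text) on success, none where A's except fires.
def pvParseLine (line : String) : Option (Int × String) :=
  match PySem.Str.splitMax? (PySem.Str.lstrip line) " " 1 with
  | some [hex_num, text] =>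
    match PySem.Int.ofStrBase? hex_num 16 with
    | some v => some (v, text)
    | none => none
  | _ => none

def gen_string_dict_py_alt (stringsoutput : String) (rooffset : Int) : List (Int × String) :=
  let pairs := ((PySem.Str.split? stringsoutput "\n").getD []).filterMap pvParseLine
  match pairs with
  | [] => []
  | (base, _) :: _ =>
    (pairs.foldl (fun (d : PySem.Dict Int String) vt =>
      d.insert ((vt.1 - base) + rooffset) vt.2) PySem.Dict.empty).items

-- ===== PRECONDITION & SPEC =====
def Spec_gen_string_dict_py (stringsoutput : String) (rooffset : Int) (out : List (Int × String)) : Prop := out = gen_string_dict_py_alt stringsoutput rooffset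
instance (stringsoutput : String) (rooffset : Int) (out : List (Int × String)) : Decidable (Spec_gen_string_dict_py stringsoutput rooffset out) := by unfold Spec_gen_string_dict_py; infer_instance

-- ===== CLAIM (what is proved, stated in full; the proofs are below) =====
def Claim_equal_gen_string_dict_py : Prop := ∀ (stringsoutput : String) (rooffset : Int), Dom_gen_string_dict_py stringsoutput rooffset → Spec_gen_string_dict_py stringsoutput rooffset (gen_string_dict_py stringsoutput rooffset)

-- ===== LEMMAS AND PROOFS =====

-- A's step, rephrased through B's parse helper, in each of the two flag states.
theorem pvStepA_eq_parse (rooffset : Int) (d : PySem.Dict Int String) (first : Bool) (fv : Int)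
    (line : String) :
    pvStepA rooffset (d, first, fv) line =
      match pvParseLine line with
      | some (v, text) =>
          if first then (d.insert rooffset text, false, v)
          else (d.insert ((v - fv) + rooffset) text, first, fv)
      | none => (d, first, fv) := by
  unfold pvStepA pvParseLine
  rcases h : PySem.Str.splitMax? (PySem.Str.lstrip line) " " 1 with _ | (_ | ⟨a, _ | ⟨b, _ | ⟨c, tl⟩⟩⟩) <;>
    simp only [h]
  all_goals try rfl
  rcases PySem.Int.ofStrBase? a 16 with _ | v <;> rfl

-- After the first pair, A's loop is B's uniform insert fold.
theorem pvFoldA_false (rooffset fv : Int) (lines : List String) (d : PySem.Dict Int String) :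
    (lines.foldl (pvStepA rooffset) (d, false, fv)).1 =
      (lines.filterMap pvParseLine).foldl
        (fun (d : PySem.Dict Int String) vt => d.insert ((vt.1 - fv) + rooffset) vt.2) d := by
  induction lines generalizing d with
  | nil => rfl
  | cons line rest ih =>
    simp only [List.foldl_cons, List.filterMap_cons, pvStepA_eq_parse]
    rcases pvParseLine line with _ | ⟨v, t⟩ <;> simp [ih]

-- The whole of A's loop, in terms of the parsed pairs.
theorem pvFoldA_true (rooffset fv : Int) (lines : List String) (d : PySem.Dict Int String) :
    (lines.foldl (pvStepA rooffset) (d, true, fv)).1 =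
      match lines.filterMap pvParseLine with
      | [] => d
      | (v0, t0) :: rest =>
          rest.foldl (fun (d : PySem.Dict Int String) vt =>
            d.insert ((vt.1 - v0) + rooffset) vt.2) (d.insert rooffset t0) := by
  induction lines generalizing fv with
  | nil => rfl
  | cons line rest ih =>
    simp only [List.foldl_cons, List.filterMap_cons, pvStepA_eq_parse]
    rcases pvParseLine line with _ | ⟨v, t⟩
    · simpa using ih fv
    · simpa using pvFoldA_false rooffset v rest (d.insert rooffset t)

-- ===== VERDICT (by name: the statement is the Claim_ definition above) =====
theorem gen_string_dict_py_spec : Claim_equal_gen_string_dict_py := by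
  intro s ro _
  simp only [Spec_gen_string_dict_py, gen_string_dict_py, gen_string_dict_py_alt]
  rw [pvFoldA_true]
  rcases h : ((PySem.Str.split? s "\n").getD []).filterMap pvParseLine with _ | ⟨⟨v0, t0⟩, rest⟩
  · rfl
  · simp only [List.foldl_cons]
    have e : v0 - v0 + ro = ro := by omega
    rw [e]
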